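-- pv_equiv track=rewrite | github.com/ViktorMykra/ViktorMykra | Hirsipuu/Hirsipuu/Hirsipuu.py | word_processor
-- ===== SOURCE A (Python) =====
-- def word_processor(word):
--     """
--     Takes a word, and makes a dict with letters and their index in the word.
--     :param word: str a word.
--     :return: dict with letters and their index in the word.
--     """
--     letters = list(word)
--     letters_dict = {}
--     for letter in letters:
--         letters_dict[letter] = []
--     for i in range(len(letters)):
--         letters_dict[letters[i]].append(i)
--     return letters_dict
-- ===== SOURCE B (Python) =====
-- def word_processor(word):
--     return {c: [i for i, x in enumerate(word) if x == c]
--             for c in dict.fromkeys(word)}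
-- ===== Notes on version B (the rewrite author's own statement) =====
-- stated objective: idiomatic
-- what changed: Replaced A's two sequential passes (key-initialising loop plus index loop appending into the dict) by a single dict comprehension that, for each distinct letter (dict.fromkeys order), rescans the word with enumerate to collect its positions.
import Mathlib
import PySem

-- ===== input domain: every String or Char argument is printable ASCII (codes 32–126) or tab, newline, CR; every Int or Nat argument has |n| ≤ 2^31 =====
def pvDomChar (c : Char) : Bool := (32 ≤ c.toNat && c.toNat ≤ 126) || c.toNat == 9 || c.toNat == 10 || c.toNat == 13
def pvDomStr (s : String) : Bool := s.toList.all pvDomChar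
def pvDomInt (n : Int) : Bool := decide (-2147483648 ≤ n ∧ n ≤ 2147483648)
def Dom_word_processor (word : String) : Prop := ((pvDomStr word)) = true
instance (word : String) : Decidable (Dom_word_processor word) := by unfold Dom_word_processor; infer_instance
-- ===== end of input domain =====

-- B replaces A's two sequential passes by one dict comprehension that rescans the word per letter (idiomatic; not faster).

-- ===== PORT A =====
-- a Python letter (a 1-char string) as a Lean String key
def pvKey (c : Char) : String := String.ofList [c]

def word_processor (word : String) : List (String × List Int) :=
  let letters := word.toList
  let d0 : PySem.Dict String (List Int) :=
    letters.foldl (fun d c => d.insert (pvKey c) []) PySem.Dict.empty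
  let d1 :=
    (PySem.List.pyRange 0 letters.length 1).foldl
      (fun d i => d.modify (pvKey (PySem.List.pyGetD letters i ' ')) [] (· ++ [i])) d0
  d1.items

-- ===== PORT B =====
def word_processor_alt (word : String) : List (String × List Int) :=
  ((PySem.List.dedup word.toList).foldl
      (fun d c => d.insert (pvKey c)
        (((PySem.List.enumerate word.toList 0).filter (fun p => p.2 == c)).map (·.1)))
      PySem.Dict.empty).items

-- ===== PRECONDITION & SPEC =====
def Spec_word_processor (word : String) (out : List (String × List Int)) : Prop := out = word_processor_alt word
instance (word : String) (out : List (String × List Int)) : Decidable (Spec_word_processor word out) := by unfold Spec_word_processor; infer_instance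

-- ===== CLAIM (what is proved, stated in full; the proofs are below) =====
def Claim_equal_word_processor : Prop := ∀ (word : String), Dom_word_processor word → Spec_word_processor word (word_processor word)

-- ===== LEMMAS AND PROOFS =====

theorem pvKey_inj : Function.Injective pvKey := by
  intro a b h
  have : (pvKey a).toList = (pvKey b).toList := by rw [h]
  simpa [pvKey] using this

-- a fold of inserts whose keys all differ from k leaves getD at k unchanged
theorem getD_foldl_insert_of_forall_ne {α ν : Type} (l : List α) (key : α → String)
    (v : α → ν) (d : PySem.Dict String ν) (k : String) (dflt : ν)
    (h : ∀ a ∈ l, key a ≠ k) :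
    (l.foldl (fun d a => d.insert (key a) (v a)) d).getD k dflt = d.getD k dflt := by
  induction l generalizing d with
  | nil => rfl
  | cons a l ih =>
    simp only [List.foldl_cons]
    rw [ih _ (fun b hb => h b (List.mem_cons_of_mem _ hb)),
        PySem.Dict.getD_insert]
    have := h a (List.mem_cons_self)
    exact if_neg (fun hk => this hk.symm)

-- a fold of inserts whose value depends only on the (injective) key: lookup of a present key
theorem getD_foldl_insert_key_fun {α ν : Type} (l : List α) (key : α → String)
    (hinj : Function.Injective key) (v : α → ν) (d : PySem.Dict String ν)
    (c : α) (hc : c ∈ l) (dflt : ν) :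
    (l.foldl (fun d a => d.insert (key a) (v a)) d).getD (key c) dflt = v c := by
  induction l generalizing d with
  | nil => cases hc
  | cons a l ih =>
    simp only [List.foldl_cons]
    by_cases hm : c ∈ l
    · exact ih _ hm
    · have hca : c = a := by
        rcases List.mem_cons.1 hc with h1 | h1
        · exact h1
        · exact absurd h1 hm
      subst hca
      rw [getD_foldl_insert_of_forall_ne l key v _ (key c) dflt
            (fun b hb hbc => hm (hinj hbc ▸ hb))]
      exact PySem.Dict.getD_insert_self _ _ _ _

-- an injective map commutes with Set.discard
theorem map_discard_inj {α β : Type} [DecidableEq α] [DecidableEq β] (f : α → β)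
    (hinj : Function.Injective f) (s : List α) (x : α) :
    (PySem.Set.discard s x).map f = PySem.Set.discard (s.map f) (f x) := by
  simp only [PySem.Set.discard, List.filter_map]
  congr 1
  apply List.filter_congr
  intro y _
  simp [Function.comp, hinj.eq_iff]

-- an injective map commutes with Set.ofList (first occurrences map to first occurrences)
theorem ofList_map_inj {α β : Type} [DecidableEq α] [DecidableEq β] (f : α → β)
    (hinj : Function.Injective f) (l : List α) :
    PySem.Set.ofList (l.map f) = (PySem.Set.ofList l).map f := by
  induction l with
  | nil => rfl
  | cons a l ih =>
    rw [List.map_cons, PySem.Set.ofList_cons, PySem.Set.ofList_cons, List.map_cons,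
      ih, map_discard_inj f hinj]

-- ===== VERDICT (by name: the statement is the Claim_ definition above) =====
theorem word_processor_spec : Claim_equal_word_processor := by
  intro word _
  unfold Spec_word_processor word_processor word_processor_alt
  dsimp only
  set ls := word.toList with hls
  set l' : List (String × Int) :=
    (PySem.List.enumerate ls 0).map (fun p => (pvKey p.2, p.1)) with hl'
  set d0 : PySem.Dict String (List Int) :=
    ls.foldl (fun d c => d.insert (pvKey c) []) PySem.Dict.empty with hd0
  set dB : PySem.Dict String (List Int) :=
    (PySem.List.dedup ls).foldl (fun d c => d.insert (pvKey c)
      (((PySem.List.enumerate ls 0).filter (fun p => p.2 == c)).map (·.1)))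
      PySem.Dict.empty with hdB
  -- A's second loop, rewritten as a fold over the key/index pair list l'
  have hd1 : (PySem.List.pyRange 0 ls.length 1).foldl
      (fun d i => d.modify (pvKey (PySem.List.pyGetD ls i ' ')) [] (· ++ [i])) d0
      = l'.foldl (fun d p => d.modify p.1 [] (· ++ [p.2])) d0 := by
    rw [hl', List.foldl_map, PySem.List.enumerate_eq_map_pyRange ls ' ', List.foldl_map]
    rfl
  rw [hd1]
  set d1 := l'.foldl (fun d p => d.modify p.1 [] (· ++ [p.2])) d0 with hd1'
  -- keys
  have hk0 : d0.keys = PySem.Set.ofList (ls.map pvKey) := by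
    rw [hd0, PySem.Dict.keys_foldl_insert_key]
    simp [PySem.Dict.keys_empty, PySem.Set.update_nil_left]
  have hkB : dB.keys = PySem.Set.ofList (ls.map pvKey) := by
    rw [hdB, PySem.Dict.keys_foldl_insert_key]
    simp only [PySem.Dict.keys_empty, PySem.Set.update_nil_left,
      PySem.List.dedup_eq_ofList]
    rw [← ofList_map_inj pvKey pvKey_inj ls, PySem.Set.ofList_ofList]
  have hmapfst : l'.map (·.1) = ls.map pvKey := by
    rw [hl', List.map_map]
    have : ((fun (x : String × Int) => x.1) ∘ fun p : Int × Char => (pvKey p.2, p.1))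
        = pvKey ∘ (fun p : Int × Char => p.2) := rfl
    rw [this, ← List.map_map, PySem.List.map_snd_enumerate]
  have hk1 : d1.keys = PySem.Set.ofList (ls.map pvKey) := by
    rw [hd1',
      PySem.Dict.keys_foldl_modify_key l' (fun p : String × Int => p.1)
        ([] : List Int) (fun _ p => (· ++ [p.2])) d0,
      hk0, hmapfst]
    -- update of a set with elements it already contains
    rw [PySem.Set.update_eq_append_filter]
    have : (PySem.Set.ofList (ls.map pvKey)).filter
        (fun y => !(PySem.Set.contains (PySem.Set.ofList (ls.map pvKey)) y)) = [] := by
      apply List.filter_eq_nil_iff.2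
      intro y hy
      simp [hy]
    rw [this, List.append_nil]
  have hn1 : d1.keys.Nodup := by rw [hk1]; exact PySem.Set.nodup_ofList _
  have hnB : dB.keys.Nodup := by rw [hkB]; exact PySem.Set.nodup_ofList _
  -- getD agreement at every key pvKey c, c ∈ ls
  have hget : ∀ c ∈ ls, d1.getD (pvKey c) [] = dB.getD (pvKey c) [] := by
    intro c hc
    have hB : dB.getD (pvKey c) []
        = ((PySem.List.enumerate ls 0).filter (fun p => p.2 == c)).map (·.1) := by
      rw [hdB]
      exact getD_foldl_insert_key_fun (PySem.List.dedup ls) pvKey pvKey_inj _ _ c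
        ((PySem.List.mem_dedup _ _).2 hc) []
    have h0 : d0.getD (pvKey c) [] = [] := by
      rw [hd0]
      exact getD_foldl_insert_key_fun ls pvKey pvKey_inj (fun _ => []) _ c hc []
    have h1 : d1.getD (pvKey c) []
        = d0.getD (pvKey c) [] ++ (l'.filter (fun p => p.1 == pvKey c)).map (·.2) := by
      rw [hd1']
      exact PySem.Dict.getD_foldl_modify_append l' d0 (pvKey c)
    rw [h1, h0, hB, List.nil_append, hl', List.filter_map, List.map_map]
    congr 1
    apply List.filter_congr
    intro p _
    simp [pvKey_inj.eq_iff]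
  -- conclude via items = keys.map
  rw [PySem.Dict.items_eq_map_keys d1 hn1 ([] : List Int),
      PySem.Dict.items_eq_map_keys dB hnB ([] : List Int), hk1, hkB]
  apply List.map_congr_left
  intro k hk
  have : k ∈ ls.map pvKey := (PySem.Set.mem_ofList _ _).1 hk
  rcases List.mem_map.1 this with ⟨c, hc, rfl⟩
  simp [hget c hc]
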